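-- pv_equiv track=rewrite | github.com/anurag9601/brocode_challenge | 2025/python/4_april/29_apr.py | generate_noncosecutive
-- ===== SOURCE A (Python) =====
-- def generate_noncosecutive(n):
--
--     lst = ["0", "1"]
--
--     if n == 1:
--         return " ".join(lst)
--
--     for i in range(2, n + 1):
--         temp_l = []
--         index = 0
--         add = "0"
--         while True:
--             if add == "1" and lst[index][0] == "1":
--                 break
--             elif index == len(lst):
--                 add = "1"
--                 index = 0
--             else:
--                 temp_l.append(add + lst[index])
--                 index += 1
--         lst = temp_l
--
--     return " ".join(lst)
-- ===== SOURCE B (Python) =====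
-- def generate_noncosecutive(n):
--     # n <= 1 (including 0 and negatives) yields the two one-bit strings, as A does.
--     if n <= 1:
--         return "0 1"
--     res = []
--     stack = ["1", "0"]
--     while stack:
--         cur = stack.pop()
--         if len(cur) >= n:
--             res.append(cur)
--             continue
--         if cur[-1] != "1":
--             stack.append(cur + "1")
--         stack.append(cur + "0")
--     return " ".join(res)
-- ===== Notes on version B (the rewrite author's own statement) =====
-- stated objective: simpler
-- what changed: Replaces A's generation-by-generation rebuild (an iterated index/flag while-loop that prefixes '0' then '1' onto the previous generation's list) with a single explicit-stack depth-first search that builds each string left-to-right, trying '0' before '1' and skipping '1' after a '1', emitting the strings in the same lexicographic order.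
import Mathlib
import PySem

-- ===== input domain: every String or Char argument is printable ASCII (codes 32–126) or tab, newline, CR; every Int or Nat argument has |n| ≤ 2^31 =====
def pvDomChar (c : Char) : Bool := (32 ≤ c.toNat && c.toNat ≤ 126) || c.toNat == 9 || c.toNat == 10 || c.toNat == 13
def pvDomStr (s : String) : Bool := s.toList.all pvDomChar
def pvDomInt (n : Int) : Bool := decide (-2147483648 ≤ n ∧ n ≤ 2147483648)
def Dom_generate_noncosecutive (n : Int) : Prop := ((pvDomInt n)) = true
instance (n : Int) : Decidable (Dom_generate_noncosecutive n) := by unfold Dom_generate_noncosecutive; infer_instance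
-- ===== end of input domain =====

-- B replaces A's per-length rebuild (an index/flag while-loop prefixing '0' then '1' onto the
-- previous generation) with an explicit-stack DFS building each string left-to-right
-- ('0' first, '1' only after a non-'1'), which emits the same strings in the same order; same cost.

-- ===== PORT A =====
-- Python strings are ported as List Char (PySem.Chars is the exact model); the final value is
-- String.ofList of " ".join's character list.
-- The 'while True' loop of A, transliterated step for step; 'fuel' only makes it total
-- (2*len+2 steps always suffice, proved below); state (add, index, temp_l) as in A.
def pvWhileA (lst : List (List Char)) : Nat → List Char → Nat → List (List Char) → List (List Char)
  | 0, _, _, temp => temp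
  | fuel+1, add, index, temp =>
    if add = ['1'] then
      -- Python evaluates lst[index][0] here; none = IndexError (never reached on A's states)
      match lst[index]? with
      | none => temp
      | some s =>
        if PySem.List.pyGet? s 0 = some '1' then temp  -- break
        else pvWhileA lst fuel add (index+1) (temp ++ [add ++ s])
    else
      if index = lst.length then pvWhileA lst fuel ['1'] 0 temp
      else
        match lst[index]? with
        | none => temp  -- unreachable: index < lst.length here
        | some s => pvWhileA lst fuel add (index+1) (temp ++ [add ++ s])

def generate_noncosecutive (n : Int) : String :=
  let lst : List (List Char) := [['0'], ['1']]
  if n = 1 then String.ofList (PySem.Chars.join [' '] lst)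
  else
    let lst := (PySem.List.pyRange 2 (n+1) 1).foldl
      (fun l _ => pvWhileA l (2 * l.length + 2) ['0'] 0 []) lst
    String.ofList (PySem.Chars.join [' '] lst)

-- ===== PORT B =====
-- the explicit-stack DFS loop of Source B; the list head is the stack top (Python pops/pushes at
-- the end of its list); res is the output accumulator, strings as List Char.
-- 'termination_by' sums 3^(n - length) over the stack: a pop-and-push replaces 3^(k+1) by
-- at most 2*3^k, so the sum strictly decreases (this only proves the loop total).
-- pv3pow_lt is cited by pvLoop's decreasing_by (termination only)
theorem pv3pow_lt (n L : Nat) (h : L < n) : 3 ^ (n - (L+1)) + 3 ^ (n - (L+1)) < 3 ^ (n - L) := by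
  have hk : n - L = (n - (L + 1)) + 1 := by omega
  have hp : 0 < 3 ^ (n - (L + 1)) := Nat.pow_pos (by norm_num)
  rw [hk, pow_succ]
  omega

def pvLoop (n : Nat) : List (List Char) → List (List Char) → List (List Char)
  | [], res => res
  | cur :: stack, res =>
    if n ≤ cur.length then pvLoop n stack (res ++ [cur])
    else
      pvLoop n ((cur ++ ['0']) :: ((if cur.getLast? ≠ some '1' then [cur ++ ['1']] else []) ++ stack)) res
termination_by stack _ => (stack.map (fun s => 3 ^ (n - s.length))).sum
decreasing_by
  · simp
  · rename_i hlen
    have key := pv3pow_lt n cur.length (by omega)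
    have hp : 0 < 3 ^ (n - (cur.length + 1)) := Nat.pow_pos (by norm_num)
    split_ifs <;> simp <;> omega

def generate_noncosecutive_alt (n : Int) : String :=
  if n ≤ 1 then "0 1"
  else String.ofList (PySem.Chars.join [' '] (pvLoop n.toNat [['0'], ['1']] []))

-- ===== PRECONDITION & SPEC =====
def Spec_generate_noncosecutive (n : Int) (out : String) : Prop := out = generate_noncosecutive_alt n
instance (n : Int) (out : String) : Decidable (Spec_generate_noncosecutive n out) := by unfold Spec_generate_noncosecutive; infer_instance

-- ===== CLAIM (what is proved, stated in full; the proofs are below) =====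
def Claim_equal_generate_noncosecutive : Prop := ∀ (n : Int), Dom_generate_noncosecutive n → Spec_generate_noncosecutive n (generate_noncosecutive n)

-- ===== LEMMAS AND PROOFS =====

-- pvExt m last1 = all length-m bit strings with no "11", not starting with '1' if last1, in lex order
def pvExt : Nat → Bool → List (List Char)
  | 0, _ => [[]]
  | m+1, last1 => (pvExt m false).map ('0' :: ·) ++ (if last1 then [] else (pvExt m true).map ('1' :: ·))


theorem pvExt_ne_nil (m : Nat) (b : Bool) : pvExt m b ≠ [] := by
  induction m generalizing b with
  | zero => simp [pvExt]
  | succ m ih =>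
    intro h
    have h2 := List.append_eq_nil_iff.mp h
    exact (ih false) (by simpa using h2.1)

theorem pvLoop_eq (n : Nat) : ∀ (stack res : List (List Char)),
    pvLoop n stack res
      = res ++ stack.flatMap (fun cur =>
          (pvExt (n - cur.length) (cur.getLast? == some '1')).map (cur ++ ·)) := by
  intro stack res
  induction stack, res using pvLoop.induct n with
  | case1 res => simp [pvLoop]
  | case2 cur stack res h ih =>
    rw [pvLoop, if_pos h, ih]
    simp [Nat.sub_eq_zero_of_le h, pvExt]
  | case3 cur stack res h ih =>
    simp only [dite_eq_ite] at ih
    rw [pvLoop, if_neg h, ih]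
    have hm : n - cur.length = (n - (cur.length + 1)) + 1 := by omega
    by_cases hb : cur.getLast? ≠ some '1'
    · have hbb : (cur.getLast? == some '1') = false := by simpa using hb
      rw [if_pos hb]
      simp only [List.flatMap_cons, List.flatMap_append, List.flatMap_nil]
      rw [hm, hbb]
      simp [pvExt, Function.comp_def]
    · have hbb : (cur.getLast? == some '1') = true := by
        simp only [not_not] at hb
        simp [hb]
      rw [if_neg hb]
      simp only [List.flatMap_cons, List.nil_append]
      rw [hm, hbb]
      simp [pvExt, Function.comp_def]

theorem pvWhile_phase0 (lst : List (List Char)) (k : Nat) :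
    ∀ (index : Nat) (temp : List (List Char)) (fuel : Nat), index + k = lst.length →
    pvWhileA lst (fuel + k + 1) ['0'] index temp
      = pvWhileA lst fuel ['1'] 0 (temp ++ (lst.drop index).map (['0'] ++ ·)) := by
  induction k with
  | zero =>
    intro index temp fuel h
    have hi : index = lst.length := by omega
    rw [show fuel + 0 + 1 = fuel + 1 from rfl, pvWhileA]
    simp [hi, List.drop_length]
  | succ k ih =>
    intro index temp fuel h
    have hidx : index < lst.length := by omega
    have hred : pvWhileA lst ((fuel + k + 1) + 1) ['0'] index temp
        = pvWhileA lst (fuel + k + 1) ['0'] (index+1) (temp ++ [['0'] ++ lst[index]]) := by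
      rw [pvWhileA, if_neg (by decide), if_neg (by omega), List.getElem?_eq_getElem hidx]
    rw [show fuel + (k+1) + 1 = (fuel + k + 1) + 1 from rfl, hred]
    rw [ih (index+1) (temp ++ [['0'] ++ lst[index]]) fuel (by omega)]
    rw [List.drop_eq_getElem_cons hidx]
    simp
    rw [List.drop_eq_getElem_cons (show index < (List.map (fun x => '0' :: x) lst).length by
      simpa using hidx)]
    simp

theorem pvWhile_phase1 (l0 : List (List Char)) (s1 : List Char) (rest : List (List Char))
    (h0 : ∀ s ∈ l0, PySem.List.pyGet? s 0 ≠ some '1')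
    (h1 : PySem.List.pyGet? s1 0 = some '1') :
    ∀ (d : Nat) (j : Nat) (temp : List (List Char)) (fuel : Nat),
      j + d = l0.length → l0.length - j < fuel →
    pvWhileA (l0 ++ s1 :: rest) fuel ['1'] j temp = temp ++ (l0.drop j).map (['1'] ++ ·) := by
  intro d
  induction d with
  | zero =>
    intro j temp fuel h hf
    have hj : j = l0.length := by omega
    obtain ⟨f, rfl⟩ : ∃ f, fuel = f + 1 := ⟨fuel - 1, by omega⟩
    rw [pvWhileA, if_pos rfl]
    subst hj
    rw [List.getElem?_append_right (le_refl _)]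
    simp [h1]
  | succ d ih =>
    intro j temp fuel h hf
    have hj : j < l0.length := by omega
    obtain ⟨f, rfl⟩ : ∃ f, fuel = f + 1 := ⟨fuel - 1, by omega⟩
    have hred : pvWhileA (l0 ++ s1 :: rest) (f+1) ['1'] j temp
        = if PySem.List.pyGet? l0[j] 0 = some '1' then temp
          else pvWhileA (l0 ++ s1 :: rest) f ['1'] (j+1) (temp ++ [['1'] ++ l0[j]]) := by
      rw [pvWhileA, if_pos rfl, List.getElem?_append_left hj, List.getElem?_eq_getElem hj]
    rw [hred, if_neg (h0 _ (List.getElem_mem hj))]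
    rw [ih (j+1) (temp ++ [['1'] ++ l0[j]]) f (by omega) (by omega)]
    rw [List.drop_eq_getElem_cons hj]
    simp
    rw [List.drop_eq_getElem_cons (show j < (List.map (fun x => '1' :: x) l0).length by
      simpa using hj)]
    simp

theorem pvStep (i : Nat) (hi : 1 ≤ i) :
    pvWhileA (pvExt i false) (2 * (pvExt i false).length + 2) ['0'] 0 [] = pvExt (i+1) false := by
  obtain ⟨j, rfl⟩ : ∃ j, i = j + 1 := ⟨i - 1, by omega⟩
  obtain ⟨t, ts, ht⟩ : ∃ t ts, pvExt j true = t :: ts := by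
    cases h : pvExt j true with
    | nil => exact absurd h (pvExt_ne_nil j true)
    | cons t ts => exact ⟨t, ts, rfl⟩
  have hL : pvExt (j+1) false
      = (pvExt j false).map ('0' :: ·) ++ ('1' :: t) :: ts.map ('1' :: ·) := by
    conv_lhs => rw [show pvExt (j+1) false
      = (pvExt j false).map ('0' :: ·) ++ (pvExt j true).map ('1' :: ·) from by simp [pvExt]]
    rw [ht]
    simp
  rw [show 2 * (pvExt (j+1) false).length + 2
      = ((pvExt (j+1) false).length + 1) + (pvExt (j+1) false).length + 1 from by omega]
  rw [pvWhile_phase0 _ _ 0 [] _ (by omega)]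
  conv_lhs => rw [hL]
  rw [pvWhile_phase1 ((pvExt j false).map ('0' :: ·)) ('1' :: t) (ts.map ('1' :: ·))
      (by intro s hs
          simp only [List.mem_map] at hs
          obtain ⟨x, _, rfl⟩ := hs
          simp)
      (by simp)
      ((pvExt j false).map ('0' :: ·)).length 0 _ _ (by omega)
      (by simp only [List.length_append, List.length_map, List.length_cons, Nat.sub_zero]; omega)]
  rw [show pvExt (j+1+1) false
      = (pvExt (j+1) false).map ('0' :: ·) ++ (pvExt (j+1) true).map ('1' :: ·) from by simp [pvExt]]
  rw [show pvExt (j+1) true = (pvExt j false).map ('0' :: ·) from by simp [pvExt]]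
  rw [hL]
  simp [Function.comp_def]

theorem pvFold (L : List Int) : ∀ (i : Nat), 1 ≤ i →
    L.foldl (fun l _ => pvWhileA l (2 * l.length + 2) ['0'] 0 []) (pvExt i false)
      = pvExt (i + L.length) false := by
  induction L with
  | nil => intro i _; simp
  | cons a L ih =>
    intro i hi
    simp only [List.foldl_cons]
    rw [pvStep i hi]
    rw [ih (i+1) (by omega)]
    congr 1
    simp; omega

-- ===== VERDICT (by name: the statement is the Claim_ definition above) =====
theorem generate_noncosecutive_spec : Claim_equal_generate_noncosecutive := by
  unfold Claim_equal_generate_noncosecutive Spec_generate_noncosecutive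
  intro n _
  unfold generate_noncosecutive generate_noncosecutive_alt
  by_cases h1 : n = 1
  · subst h1; decide
  · rw [if_neg h1]
    by_cases h0 : n ≤ 1
    · rw [if_pos h0]
      rw [PySem.List.pyRange_one_eq_nil (by omega)]
      decide
    · rw [if_neg h0]
      have hB : pvLoop n.toNat [['0'], ['1']] [] = pvExt n.toNat false := by
        obtain ⟨m, hm⟩ : ∃ m, n.toNat = m + 1 := ⟨n.toNat - 1, by omega⟩
        rw [pvLoop_eq, hm]
        simp [pvExt]
      rw [hB]
      rw [show ([['0'], ['1']] : List (List Char)) = pvExt 1 false from rfl]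
      rw [pvFold _ 1 (le_refl 1)]
      have : 1 + (PySem.List.pyRange 2 (n+1) 1).length = n.toNat := by
        rw [PySem.List.length_pyRange_one]
        omega
      rw [this]
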